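-- pv_equiv track=rewrite | github.com/lebus237/multimodbiofusion | multimodal_biometric_fusion/scripts/evaluate.py | _parse_run_name
-- ===== SOURCE A (Python) =====
-- from typing import Dict, Optional, Tuple
--
-- def _parse_run_name(
--     run_name: str,
-- ) -> Optional[Tuple[str, str, Optional[str]]]:
--     """
--     Parse a run directory name back into (model_type, backbone, fusion_type).
--
--     Expected formats:
--       pixel_{fusion_type}_{backbone}  →  ('pixel', backbone, fusion_type)
--       feature_{backbone}              →  ('feature', backbone, None)
--
--     Returns None if the name cannot be parsed.
--     """
--     if run_name.startswith("pixel_"):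
--         rest = run_name[len("pixel_") :]
--         for ft in ("channel", "intensity", "spatial"):
--             if rest.startswith(ft + "_"):
--                 backbone = rest[len(ft) + 1 :]
--                 return "pixel", backbone, ft
--         return None  # unrecognised
--     elif run_name.startswith("feature_"):
--         backbone = run_name[len("feature_") :]
--         return "feature", backbone, None
--     return None
-- ===== SOURCE B (Python) =====
-- from typing import Optional, Tuple
--
--
-- def _parse_run_name(
--     run_name: str,
-- ) -> Optional[Tuple[str, str, Optional[str]]]:
--     parts = run_name.split("_")
--     if parts[0] == "pixel":
--         if len(parts) >= 3 and parts[1] in ("channel", "intensity", "spatial"):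
--             return "pixel", "_".join(parts[2:]), parts[1]
--         return None
--     if parts[0] == "feature":
--         if len(parts) >= 2:
--             return "feature", "_".join(parts[1:]), None
--         return None
--     return None
-- ===== Notes on version B (the rewrite author's own statement) =====
-- stated objective: simpler
-- what changed: B tokenizes the name once by splitting on the underscore separator and dispatches on the token list (rejoining the backbone tokens), instead of A's prefix-stripping with an inner loop that tests each fusion name via startswith and slicing.
import Mathlib
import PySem

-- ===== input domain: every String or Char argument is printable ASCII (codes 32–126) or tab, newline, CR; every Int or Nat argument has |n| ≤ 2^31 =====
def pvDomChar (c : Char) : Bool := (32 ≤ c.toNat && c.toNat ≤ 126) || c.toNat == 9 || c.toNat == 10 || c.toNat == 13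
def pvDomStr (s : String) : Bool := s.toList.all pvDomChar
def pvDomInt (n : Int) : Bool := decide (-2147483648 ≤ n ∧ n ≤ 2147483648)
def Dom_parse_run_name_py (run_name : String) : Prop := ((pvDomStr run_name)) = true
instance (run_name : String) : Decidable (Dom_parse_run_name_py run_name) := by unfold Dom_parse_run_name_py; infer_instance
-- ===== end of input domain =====

-- B tokenizes the run name once by splitting on underscores and dispatches on the token list, instead of A's prefix-stripping with an inner startswith loop; objective: simpler.


-- ===== PORT A =====
-- A's inner 'for ft in ("channel","intensity","spatial")' loop over the fusion names
def pixelFusionLoop (rest : List Char) : List String → Option (String × String × Option String)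
  | [] => none
  | ft :: fts =>
      if PySem.Chars.startswith rest (ft.toList ++ ['_']) then
        some ("pixel", String.ofList (PySem.Chars.slice rest (some ((ft.toList.length : Int) + 1)) none), some ft)
      else pixelFusionLoop rest fts

def parse_run_name_py (run_name : String) : Option (String × String × Option String) :=
  if PySem.Chars.startswith run_name.toList "pixel_".toList then
    pixelFusionLoop (PySem.Chars.slice run_name.toList (some (("pixel_".toList.length : Int))) none)
      ["channel", "intensity", "spatial"]
  else if PySem.Chars.startswith run_name.toList "feature_".toList then
    some ("feature", String.ofList (PySem.Chars.slice run_name.toList (some (("feature_".toList.length : Int))) none), none)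
  else none

-- ===== PORT B =====
-- B's dispatch on the token list produced by run_name.split('_')
def dispatchParts : List (List Char) → Option (String × String × Option String)
  | [] => none  -- unreachable: str.split never returns an empty list
  | p0 :: rest =>
    if p0 = "pixel".toList then
      match rest with
      | ft :: b0 :: bs =>
        if ft = "channel".toList ∨ ft = "intensity".toList ∨ ft = "spatial".toList then
          some ("pixel", String.ofList (PySem.Chars.join ['_'] (b0 :: bs)), some (String.ofList ft))
        else none
      | _ => none
    else if p0 = "feature".toList then
      match rest with
      | b0 :: bs => some ("feature", String.ofList (PySem.Chars.join ['_'] (b0 :: bs)), none)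
      | [] => none
    else none

def parse_run_name_py_alt (run_name : String) : Option (String × String × Option String) :=
  dispatchParts (PySem.Chars.splitOn run_name.toList ['_'])

-- ===== PRECONDITION & SPEC =====
def Spec_parse_run_name_py (run_name : String) (out : Option (String × String × Option String)) : Prop := out = parse_run_name_py_alt run_name
instance (run_name : String) (out : Option (String × String × Option String)) : Decidable (Spec_parse_run_name_py run_name out) := by unfold Spec_parse_run_name_py; infer_instance

-- ===== CLAIM (what is proved, stated in full; the proofs are below) =====
def Claim_equal_parse_run_name_py : Prop := ∀ (run_name : String), Dom_parse_run_name_py run_name → Spec_parse_run_name_py run_name (parse_run_name_py run_name)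

-- ===== LEMMAS AND PROOFS =====

-- reference single-character split used to reason about PySem.Chars.splitOn
def splitU : List Char → List (List Char)
  | [] => [[]]
  | c :: cs => if c = '_' then [] :: splitU cs else (splitU cs).modifyHead (c :: ·)

theorem splitU_ne_nil (cs : List Char) : splitU cs ≠ [] := by
  induction cs with
  | nil => simp [splitU]
  | cons c cs ih =>
    simp only [splitU]
    split_ifs
    · simp
    · cases h : splitU cs with
      | nil => exact absurd h ih
      | cons p ps => simp [List.modifyHead]

theorem go_spec : ∀ (fuel : Nat) (cs cur : List Char) (acc : List (List Char)) (p : List Char) (ps : List (List Char)),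
    cs.length < fuel → splitU cs = p :: ps →
    PySem.Chars.splitOn.go ['_'] fuel cs cur acc = acc.reverse ++ (cur.reverse ++ p) :: ps := by
  intro fuel
  induction fuel with
  | zero => intro cs cur acc p ps h; omega
  | succ fuel ih =>
    intro cs cur acc p ps h hs
    cases cs with
    | nil =>
      simp [splitU] at hs
      rw [PySem.Chars.splitOn.go]
      simp [hs.1, hs.2]
      omega
    | cons c rest =>
      rw [PySem.Chars.splitOn.go]
      by_cases hc : c = '_'
      · subst hc
        simp only [splitU, if_true] at hs
        obtain ⟨q, qs, hq⟩ : ∃ q qs, splitU rest = q :: qs := by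
          cases h' : splitU rest with
          | nil => exact absurd h' (splitU_ne_nil rest)
          | cons q qs => exact ⟨q, qs, rfl⟩
        have hlen : rest.length < fuel := by simp at h; omega
        rw [if_pos (by simp [List.isPrefixOf])]
        have hdrop : List.drop ['_'].length ('_' :: rest) = rest := rfl
        rw [hdrop, ih rest [] (cur.reverse :: acc) q qs hlen hq]
        rw [hq] at hs
        cases hs
        simp
      · simp only [splitU, if_neg hc] at hs
        obtain ⟨q, qs, hq⟩ : ∃ q qs, splitU rest = q :: qs := by
          cases h' : splitU rest with
          | nil => exact absurd h' (splitU_ne_nil rest)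
          | cons q qs => exact ⟨q, qs, rfl⟩
        have hlen : rest.length < fuel := by simp at h; omega
        rw [if_neg (by simp [List.isPrefixOf]; intro h'; exact hc h'.symm)]
        rw [ih rest (c :: cur) acc q qs hlen hq]
        rw [hq, List.modifyHead] at hs
        cases hs
        simp

theorem splitOn_eq_splitU (cs : List Char) : PySem.Chars.splitOn cs ['_'] = splitU cs := by
  obtain ⟨p, ps, hp⟩ : ∃ p ps, splitU cs = p :: ps := by
    cases h' : splitU cs with
    | nil => exact absurd h' (splitU_ne_nil cs)
    | cons p ps => exact ⟨p, ps, rfl⟩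
  rw [PySem.Chars.splitOn, go_spec (cs.length + 1) cs [] [] p ps (by omega) hp, hp]
  simp

theorem join_splitU : ∀ cs : List Char, PySem.Chars.join ['_'] (splitU cs) = cs := by
  intro cs
  induction cs with
  | nil => simp [splitU, PySem.Chars.join_singleton]
  | cons c cs ih =>
    obtain ⟨q, qs, hq⟩ : ∃ q qs, splitU cs = q :: qs := by
      cases h' : splitU cs with
      | nil => exact absurd h' (splitU_ne_nil cs)
      | cons q qs => exact ⟨q, qs, rfl⟩
    by_cases hc : c = '_'
    · subst hc
      rw [hq] at ih
      simp only [splitU, if_true, hq]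
      rw [PySem.Chars.join_cons_cons]
      simp [ih]
    · simp only [splitU, if_neg hc, hq, List.modifyHead]
      cases qs with
      | nil =>
        rw [hq] at ih
        simp [PySem.Chars.join_singleton] at ih ⊢
        simp [ih]
      | cons r rs =>
        rw [hq] at ih
        rw [PySem.Chars.join_cons_cons] at ih ⊢
        simp [ih]

theorem splitU_spec : ∀ cs : List Char,
    ('_' ∉ cs ∧ splitU cs = [cs]) ∨
    (∃ p t, '_' ∉ p ∧ cs = p ++ '_' :: t ∧ splitU cs = p :: splitU t) := by
  intro cs
  induction cs with
  | nil => left; simp [splitU]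
  | cons c cs ih =>
    by_cases hc : c = '_'
    · subst hc
      right
      exact ⟨[], cs, by simp, by simp, by simp [splitU]⟩
    · rcases ih with ⟨hm, hs⟩ | ⟨p, t, hnp, hcs, hs⟩
      · left
        constructor
        · simp [hm, Ne.symm, hc]
        · simp [splitU, if_neg hc, hs, List.modifyHead]
      · right
        refine ⟨c :: p, t, ?_, by simp [hcs], ?_⟩
        · simp [hnp, Ne.symm, hc]
        · simp [splitU, if_neg hc, hs, List.modifyHead]

theorem prefix_no_underscore : ∀ (a p t : List Char), '_' ∉ a → '_' ∉ p →
    a ++ ['_'] <+: p ++ '_' :: t → a = p := by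
  intro a
  induction a with
  | nil =>
    intro p t _ hp hpre
    cases p with
    | nil => rfl
    | cons x p' =>
      simp only [List.nil_append, List.cons_append] at hpre
      rw [List.cons_prefix_cons] at hpre
      cases hpre.1
      simp at hp
  | cons c a' ih =>
    intro p t ha hp hpre
    cases p with
    | nil =>
      simp only [List.cons_append, List.nil_append] at hpre
      rw [List.cons_prefix_cons] at hpre
      obtain ⟨h1, -⟩ := hpre
      subst h1
      simp at ha
    | cons x p' =>
      simp only [List.cons_append] at hpre
      rw [List.cons_prefix_cons] at hpre
      have : a' = p' := ih p' t (by simp at ha; exact ha.2) (by simp at hp; exact hp.2) hpre.2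
      rw [hpre.1, this]

theorem startswith_false_of_not_mem (r a : List Char) (h : '_' ∉ r) :
    PySem.Chars.startswith r (a ++ ['_']) = false := by
  by_contra hb
  have : PySem.Chars.startswith r (a ++ ['_']) = true := by
    cases hx : PySem.Chars.startswith r (a ++ ['_']) with
    | false => exact absurd hx hb
    | true => rfl
  rw [PySem.Chars.startswith_iff] at this
  exact h (this.sublist.mem (by simp))

theorem startswith_true_of_eq (p t : List Char) :
    PySem.Chars.startswith (p ++ '_' :: t) (p ++ ['_']) = true := by
  rw [PySem.Chars.startswith_iff]
  exact ⟨t, by simp⟩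

theorem startswith_false_of_ne (p t a : List Char) (ha : '_' ∉ a) (hp : '_' ∉ p) (hne : a ≠ p) :
    PySem.Chars.startswith (p ++ '_' :: t) (a ++ ['_']) = false := by
  by_contra hb
  have : PySem.Chars.startswith (p ++ '_' :: t) (a ++ ['_']) = true := by
    cases hx : PySem.Chars.startswith (p ++ '_' :: t) (a ++ ['_']) with
    | false => exact absurd hx hb
    | true => rfl
  rw [PySem.Chars.startswith_iff] at this
  exact hne (prefix_no_underscore a p t ha hp this)

-- splitU after a literal prefix ending in '_'
theorem splitU_pixel (r : List Char) : splitU ("pixel_".toList ++ r) = "pixel".toList :: splitU r := by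
  cases h : splitU r with
  | nil => exact absurd h (splitU_ne_nil r)
  | cons q qs => simp [show ("pixel_".toList = ['p','i','x','e','l','_']) from by decide, splitU, h, List.modifyHead]

theorem splitU_feature (r : List Char) : splitU ("feature_".toList ++ r) = "feature".toList :: splitU r := by
  cases h : splitU r with
  | nil => exact absurd h (splitU_ne_nil r)
  | cons q qs => simp [show ("feature_".toList = ['f','e','a','t','u','r','e','_']) from by decide, splitU, h, List.modifyHead]

theorem slice_pfx (pfx r : List Char) : PySem.Chars.slice (pfx ++ r) (some ((pfx.length : Int))) none = r := by
  rw [PySem.Chars.slice_eq_listSlice, PySem.List.slice_from _ (by positivity)]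
  simp

theorem join_split_tail (t : List Char) (q : List Char) (qs : List (List Char)) (hq : splitU t = q :: qs) :
    PySem.Chars.join ['_'] (q :: qs) = t := by
  rw [← hq, join_splitU]

theorem slice_fusion (p t : List Char) (n : Nat) (hn : p.length = n) :
    PySem.Chars.slice (p ++ '_' :: t) (some ((n : Int) + 1)) none = t := by
  rw [PySem.Chars.slice_eq_listSlice, PySem.List.slice_from _ (by positivity)]
  have : ((n : Int) + 1).toNat = p.length + 1 := by omega
  rw [this, show p ++ '_' :: t = (p ++ ['_']) ++ t from by simp]
  rw [List.drop_left' (by simp)]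

-- ===== VERDICT (by name: the statement is the Claim_ definition above) =====
theorem parse_run_name_py_spec : Claim_equal_parse_run_name_py := by
  intro s _
  unfold Spec_parse_run_name_py parse_run_name_py parse_run_name_py_alt
  rw [splitOn_eq_splitU]
  generalize s.toList = cs
  by_cases hp : "pixel_".toList <+: cs
  · obtain ⟨r, hr⟩ := hp
    subst hr
    have hsw : PySem.Chars.startswith ("pixel_".toList ++ r) "pixel_".toList = true :=
      (PySem.Chars.startswith_iff _ _).mpr ⟨r, rfl⟩
    rw [if_pos hsw, slice_pfx, splitU_pixel]
    simp only [dispatchParts]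
    rw [if_pos trivial]
    rcases splitU_spec r with ⟨hnm, hsu⟩ | ⟨p, t, hnp, hr2, hsu⟩
    · rw [hsu]
      have hA : pixelFusionLoop r ["channel", "intensity", "spatial"] = none := by
        simp only [pixelFusionLoop]
        rw [startswith_false_of_not_mem r "channel".toList hnm,
          startswith_false_of_not_mem r "intensity".toList hnm,
          startswith_false_of_not_mem r "spatial".toList hnm]
        simp
      rw [hA]
    · obtain ⟨q, qs, hq⟩ : ∃ q qs, splitU t = q :: qs := by
        cases h' : splitU t with
        | nil => exact absurd h' (splitU_ne_nil t)
        | cons q qs => exact ⟨q, qs, rfl⟩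
      rw [hsu, hq, hr2]
      have hch : ('_' : Char) ∉ "channel".toList := by decide
      have hin : ('_' : Char) ∉ "intensity".toList := by decide
      simp only [pixelFusionLoop]
      by_cases h1 : p = "channel".toList
      · subst h1
        rw [startswith_true_of_eq, if_pos rfl, slice_fusion _ t _ rfl,
          if_pos (Or.inl rfl), join_split_tail t q qs hq,
          show String.ofList "channel".toList = "channel" from by decide]
      · rw [startswith_false_of_ne p t "channel".toList hch hnp (fun h => h1 h.symm)]
        by_cases h2 : p = "intensity".toList
        · subst h2
          rw [if_neg (by simp), startswith_true_of_eq, if_pos rfl, slice_fusion _ t _ rfl,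
            if_pos (Or.inr (Or.inl rfl)), join_split_tail t q qs hq,
            show String.ofList "intensity".toList = "intensity" from by decide]
        · rw [startswith_false_of_ne p t "intensity".toList hin hnp (fun h => h2 h.symm)]
          by_cases h3 : p = "spatial".toList
          · subst h3
            rw [if_neg (by simp), if_neg (by simp), startswith_true_of_eq, if_pos rfl,
              slice_fusion _ t _ rfl, if_pos (Or.inr (Or.inr rfl)), join_split_tail t q qs hq,
              show String.ofList "spatial".toList = "spatial" from by decide]
          · have hsp : ('_' : Char) ∉ "spatial".toList := by decide
            rw [startswith_false_of_ne p t "spatial".toList hsp hnp (fun h => h3 h.symm)]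
            rw [if_neg (by simp), if_neg (by simp), if_neg (by simp),
              if_neg (by rintro (h | h | h) <;> [exact h1 h; exact h2 h; exact h3 h])]
  · have hswp : PySem.Chars.startswith cs "pixel_".toList = false := by
      rw [Bool.eq_false_iff]
      intro h
      exact hp ((PySem.Chars.startswith_iff _ _).mp h)
    rw [hswp]
    simp only [Bool.false_eq_true, if_false]
    by_cases hf : "feature_".toList <+: cs
    · obtain ⟨r, hr⟩ := hf
      subst hr
      have hsw : PySem.Chars.startswith ("feature_".toList ++ r) "feature_".toList = true :=
        (PySem.Chars.startswith_iff _ _).mpr ⟨r, rfl⟩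
      rw [if_pos hsw, slice_pfx, splitU_feature]
      obtain ⟨q, qs, hq⟩ : ∃ q qs, splitU r = q :: qs := by
        cases h' : splitU r with
        | nil => exact absurd h' (splitU_ne_nil r)
        | cons q qs => exact ⟨q, qs, rfl⟩
      rw [hq]
      simp only [dispatchParts]
      rw [if_pos trivial, join_split_tail r q qs hq,
        if_neg (show "feature".toList = "pixel".toList → False from by decide)]
    · have hswf : PySem.Chars.startswith cs "feature_".toList = false := by
        rw [Bool.eq_false_iff]
        intro h
        exact hf ((PySem.Chars.startswith_iff _ _).mp h)
      rw [hswf]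
      simp only [Bool.false_eq_true, if_false]
      rcases splitU_spec cs with ⟨hnm, hsu⟩ | ⟨p, t, hnp, hr2, hsu⟩
      · rw [hsu]
        simp only [dispatchParts]
        rcases eq_or_ne cs "pixel".toList with hx | hx
        · rw [if_pos hx]
        · rcases eq_or_ne cs "feature".toList with hy | hy
          · rw [if_neg hx, if_pos hy]
          · rw [if_neg hx, if_neg hy]
      · obtain ⟨q, qs, hq⟩ : ∃ q qs, splitU t = q :: qs := by
          cases h' : splitU t with
          | nil => exact absurd h' (splitU_ne_nil t)
          | cons q qs => exact ⟨q, qs, rfl⟩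
        have h1 : p ≠ "pixel".toList := by
          intro h
          subst h
          exact hp ⟨t, by rw [hr2]; simp [show "pixel_".toList = "pixel".toList ++ ['_'] from by decide]⟩
        have h2 : p ≠ "feature".toList := by
          intro h
          subst h
          exact hf ⟨t, by rw [hr2]; simp [show "feature_".toList = "feature".toList ++ ['_'] from by decide]⟩
        rw [hsu, hq]
        simp only [dispatchParts]
        rw [if_neg h1, if_neg h2]
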